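-- pv_equiv track=rewrite | github.com/karthikn72/codewars-scraper | CodeWarsScraper/CodeWars Tasks/Python/7 kyu/Hex Word Sum.py | hex_word_sum
-- ===== SOURCE A (Python) =====
-- def hex_word_sum(string):
--     # C0DE
--     string=string[::-1]
--     words=string.split()
--     sum2=0
--     sum1=0
--     start=1
--     check=0
--     for word in words:
--       start=1
--       sum1=0
--       if check==0:
--           sum2+=sum1
--       check=0
--       for i in word:
--         if i=="A":
--           sum1+=10*start
--           start=start*16
--         elif i=="B":
--           sum1+=11*start
--           start=start*16
--         elif i=="C":
--           sum1+=12*start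
--           start=start*16
--         elif i=="D":
--           sum1+=13*start
--           start=start*16
--         elif i=="E":
--           sum1+=14*start
--           start=start*16
--         elif i=="F":
--           sum1+=15*start
--           start=start*16
--         elif i=='S':
--           sum1+=5*start
--           start=start*16
--         elif i=='O':
--           start=start*16
--         else:
--             sum1=0
--             break
--       sum2+=sum1
--       check=1
--     return sum2
-- ===== SOURCE B (Python) =====
-- def hex_word_sum(string):
--     digits = {'A': 10, 'B': 11, 'C': 12, 'D': 13, 'E': 14, 'F': 15, 'S': 5, 'O': 0}
--     total = 0
--     for word in string.split():
--         val = 0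
--         for ch in word:
--             if ch in digits:
--                 val = val * 16 + digits[ch]
--             else:
--                 val = 0
--                 break
--         total += val
--     return total
-- ===== Notes on version B (the rewrite author's own statement) =====
-- stated objective: simpler
-- what changed: B drops the whole-string reversal and the running power-of-16 multiplier: it splits the original string and parses each word forward with Horner's rule (value = value*16 + digit) over a digit dict, where A reverses the string and accumulates each reversed word least-significant-digit first with an explicit multiplier variable.
import Mathlib
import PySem

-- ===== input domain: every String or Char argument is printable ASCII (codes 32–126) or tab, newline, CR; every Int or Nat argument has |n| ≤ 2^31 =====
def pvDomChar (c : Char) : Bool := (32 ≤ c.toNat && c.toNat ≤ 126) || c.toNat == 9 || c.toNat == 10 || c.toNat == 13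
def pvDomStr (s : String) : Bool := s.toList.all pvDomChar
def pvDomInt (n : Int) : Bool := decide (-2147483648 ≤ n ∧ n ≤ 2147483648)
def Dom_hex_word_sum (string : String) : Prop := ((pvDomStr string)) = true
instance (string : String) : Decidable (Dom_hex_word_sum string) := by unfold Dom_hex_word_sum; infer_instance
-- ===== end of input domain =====

-- B replaces A's whole-string reversal + LSB-first power accumulation by a forward Horner parse per word (simpler decomposition, same cost).

-- ===== PORT A =====
-- inner loop of A: chars of the (reversed) word, state sum1/start; 'else' branch sets sum1=0 and breaks
def hexA_go : List Char → Int → Int → Int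
  | [], sum1, _ => sum1
  | c :: rest, sum1, start =>
    if c = 'A' then hexA_go rest (sum1 + 10 * start) (start * 16)
    else if c = 'B' then hexA_go rest (sum1 + 11 * start) (start * 16)
    else if c = 'C' then hexA_go rest (sum1 + 12 * start) (start * 16)
    else if c = 'D' then hexA_go rest (sum1 + 13 * start) (start * 16)
    else if c = 'E' then hexA_go rest (sum1 + 14 * start) (start * 16)
    else if c = 'F' then hexA_go rest (sum1 + 15 * start) (start * 16)
    else if c = 'S' then hexA_go rest (sum1 + 5 * start) (start * 16)
    else if c = 'O' then hexA_go rest sum1 (start * 16)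
    else 0

def hex_word_sum (string : String) : Int :=
  -- string = string[::-1]  (step -1 is never an error, hence the getD)
  let string := (PySem.Str.slice? string none none (-1)).getD ""
  let words := PySem.Str.split₀ string
  let r := words.foldl (fun (st : Int × Int) (word : String) =>
      let sum2 := st.1
      let check := st.2
      let sum1 : Int := 0
      let sum2 := if check = 0 then sum2 + sum1 else sum2
      let sum1 := hexA_go word.toList sum1 1
      (sum2 + sum1, (1 : Int))) ((0 : Int), (0 : Int))
  r.1

-- ===== PORT B =====
def hexB_digits : List (Char × Int) :=
  [('A', 10), ('B', 11), ('C', 12), ('D', 13), ('E', 14), ('F', 15), ('S', 5), ('O', 0)]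

-- forward Horner parse of one word; unmapped char zeroes the word
def hexB_word : List Char → Int → Int
  | [], val => val
  | c :: rest, val =>
    match hexB_digits.lookup c with
    | some d => hexB_word rest (val * 16 + d)
    | none => 0

def hex_word_sum_alt (string : String) : Int :=
  (PySem.Str.split₀ string).foldl (fun total word => total + hexB_word word.toList 0) 0

-- ===== PRECONDITION & SPEC =====
def Spec_hex_word_sum (string : String) (out : Int) : Prop := out = hex_word_sum_alt string
instance (string : String) (out : Int) : Decidable (Spec_hex_word_sum string out) := by unfold Spec_hex_word_sum; infer_instance

-- ===== CLAIM (what is proved, stated in full; the proofs are below) =====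
def Claim_equal_hex_word_sum : Prop := ∀ (string : String), Dom_hex_word_sum string → Spec_hex_word_sum string (hex_word_sum string)

-- ===== LEMMAS AND PROOFS =====

def hexDg (c : Char) : Int := ((hexB_digits.lookup c).getD 0)
def hexOk (c : Char) : Bool := (hexB_digits.lookup c).isSome
def allOk (w : List Char) : Bool := w.all hexOk
def lsbVal : List Char → Int
  | [] => 0
  | c :: rest => hexDg c + 16 * lsbVal rest

theorem hexA_go_eval (cs : List Char) : ∀ (s p : Int),
    hexA_go cs s p = if allOk cs then s + p * lsbVal cs else 0 := by
  induction cs with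
  | nil => intro s p; simp [hexA_go, allOk, lsbVal]
  | cons c rest ih =>
    intro s p
    simp only [hexA_go]
    by_cases h1 : c = 'A'
    · subst h1
      simp only [if_pos rfl]
      rw [ih]
      simp [allOk, lsbVal, hexOk, hexDg, hexB_digits, List.lookup]
      split_ifs <;> [ring; rfl]
    rw [if_neg h1]
    by_cases h2 : c = 'B'
    · subst h2
      simp only [if_pos rfl, if_neg (by decide : ¬('B' = 'A'))]
      rw [ih]
      simp [allOk, lsbVal, hexOk, hexDg, hexB_digits, List.lookup]
      split_ifs <;> [ring; rfl]
    rw [if_neg h2]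
    by_cases h3 : c = 'C'
    · subst h3
      simp only [if_pos rfl, if_neg (by decide : ¬('C' = 'A')), if_neg (by decide : ¬('C' = 'B'))]
      rw [ih]
      simp [allOk, lsbVal, hexOk, hexDg, hexB_digits, List.lookup]
      split_ifs <;> [ring; rfl]
    rw [if_neg h3]
    by_cases h4 : c = 'D'
    · subst h4
      simp only [if_pos rfl, if_neg (by decide : ¬('D' = 'A')), if_neg (by decide : ¬('D' = 'B')), if_neg (by decide : ¬('D' = 'C'))]
      rw [ih]
      simp [allOk, lsbVal, hexOk, hexDg, hexB_digits, List.lookup]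
      split_ifs <;> [ring; rfl]
    rw [if_neg h4]
    by_cases h5 : c = 'E'
    · subst h5
      simp only [if_pos rfl, if_neg (by decide : ¬('E' = 'A')), if_neg (by decide : ¬('E' = 'B')), if_neg (by decide : ¬('E' = 'C')), if_neg (by decide : ¬('E' = 'D'))]
      rw [ih]
      simp [allOk, lsbVal, hexOk, hexDg, hexB_digits, List.lookup]
      split_ifs <;> [ring; rfl]
    rw [if_neg h5]
    by_cases h6 : c = 'F'
    · subst h6
      simp only [if_pos rfl, if_neg (by decide : ¬('F' = 'A')), if_neg (by decide : ¬('F' = 'B')), if_neg (by decide : ¬('F' = 'C')), if_neg (by decide : ¬('F' = 'D')), if_neg (by decide : ¬('F' = 'E'))]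
      rw [ih]
      simp [allOk, lsbVal, hexOk, hexDg, hexB_digits, List.lookup]
      split_ifs <;> [ring; rfl]
    rw [if_neg h6]
    by_cases h7 : c = 'S'
    · subst h7
      simp only [if_pos rfl, if_neg (by decide : ¬('S' = 'A')), if_neg (by decide : ¬('S' = 'B')), if_neg (by decide : ¬('S' = 'C')), if_neg (by decide : ¬('S' = 'D')), if_neg (by decide : ¬('S' = 'E')), if_neg (by decide : ¬('S' = 'F'))]
      rw [ih]
      simp [allOk, lsbVal, hexOk, hexDg, hexB_digits, List.lookup]
      split_ifs <;> [ring; rfl]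
    rw [if_neg h7]
    by_cases h8 : c = 'O'
    · subst h8
      simp only [if_pos rfl, if_neg (by decide : ¬('O' = 'A')), if_neg (by decide : ¬('O' = 'B')), if_neg (by decide : ¬('O' = 'C')), if_neg (by decide : ¬('O' = 'D')), if_neg (by decide : ¬('O' = 'E')), if_neg (by decide : ¬('O' = 'F')), if_neg (by decide : ¬('O' = 'S'))]
      rw [ih]
      simp [allOk, lsbVal, hexOk, hexDg, hexB_digits, List.lookup]
      split_ifs <;> [ring; rfl]
    rw [if_neg h8]
    have hok : hexB_digits.lookup c = none := by
      simp only [hexB_digits, List.lookup]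
      have e1 : (c == 'A') = false := by simpa using h1
      have e2 : (c == 'B') = false := by simpa using h2
      have e3 : (c == 'C') = false := by simpa using h3
      have e4 : (c == 'D') = false := by simpa using h4
      have e5 : (c == 'E') = false := by simpa using h5
      have e6 : (c == 'F') = false := by simpa using h6
      have e7 : (c == 'S') = false := by simpa using h7
      have e8 : (c == 'O') = false := by simpa using h8
      simp [e1, e2, e3, e4, e5, e6, e7, e8]
    simp [allOk, hexOk, hok]

theorem hexB_word_eval (w : List Char) : ∀ (v : Int),
    hexB_word w v = if allOk w then List.foldl (fun v c => v * 16 + hexDg c) v w else 0 := by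
  induction w with
  | nil => intro v; simp [hexB_word, allOk]
  | cons c rest ih =>
    intro v
    rcases h : hexB_digits.lookup c with _ | d
    · simp [hexB_word, h, allOk, hexOk]
    · rw [show hexB_word (c :: rest) v = hexB_word rest (v * 16 + d) by simp [hexB_word, h], ih]
      simp only [allOk, List.all_cons, hexOk, hexDg, List.foldl_cons, h, Option.isSome_some,
        Option.getD_some, Bool.true_and]

theorem lsbVal_append (xs : List Char) (c : Char) :
    lsbVal (xs ++ [c]) = lsbVal xs + 16 ^ xs.length * hexDg c := by
  induction xs with
  | nil => simp [lsbVal]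
  | cons x rest ih => simp [lsbVal, ih, List.length_cons]; ring

theorem horner_eq_lsb_rev (w : List Char) : ∀ (v : Int),
    List.foldl (fun v c => v * 16 + hexDg c) v w = v * 16 ^ w.length + lsbVal w.reverse := by
  induction w with
  | nil => intro v; simp [lsbVal]
  | cons c rest ih =>
    intro v
    rw [List.foldl_cons, ih, List.reverse_cons, lsbVal_append]
    simp [List.length_reverse, pow_succ]
    ring

theorem word_eq (w : List Char) : hexA_go w.reverse 0 1 = hexB_word w 0 := by
  rw [hexA_go_eval, hexB_word_eval]
  have : allOk w.reverse = allOk w := by simp [allOk, List.all_reverse]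
  rw [this]
  split_ifs with h
  · rw [horner_eq_lsb_rev]; ring
  · rfl

-- ---- the split() / reverse relationship ----

def qRev (ws : List (List Char)) : List (List Char) := (ws.map List.reverse).reverse

theorem splitOnP_snoc_not (p : Char → Bool) (a : Char) (ha : ¬ p a) :
    ∀ (ys : List Char), List.splitOnP p (ys ++ [a]) =
      (List.splitOnP p ys).dropLast ++ [(List.splitOnP p ys).getLastD [] ++ [a]] := by
  intro ys
  induction ys with
  | nil => simp [List.splitOnP_nil, List.splitOnP_cons, ha]
  | cons y t ih =>
    rcases hS : List.splitOnP p t with _ | ⟨w, rest⟩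
    · exact absurd hS (List.splitOnP_ne_nil p t)
    · by_cases hy : p y
      · simp [List.cons_append, List.splitOnP_cons, hy, ih, hS]
      · rcases rest with _ | ⟨r, rs⟩
        · simp [List.cons_append, List.splitOnP_cons, hy, ih, hS]
        · simp [List.cons_append, List.splitOnP_cons, hy, ih, hS]

theorem splitOnP_reverse (p : Char → Bool) (l : List Char) :
    List.splitOnP p l.reverse = qRev (List.splitOnP p l) := by
  induction l with
  | nil => simp [List.splitOnP_nil, qRev]
  | cons c t ih =>
    rcases hS : List.splitOnP p t with _ | ⟨w, rest⟩
    · exact absurd hS (List.splitOnP_ne_nil p t)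
    · by_cases hc : p c
      · rw [List.reverse_cons, List.splitOnP_append_cons p _ _ _ hc, ih,
            List.splitOnP_nil, List.splitOnP_cons]
        simp [hc, qRev, hS]
      · rw [List.reverse_cons, splitOnP_snoc_not p c hc, ih, List.splitOnP_cons]
        simp only [hS, if_neg hc, List.modifyHead_cons, qRev, List.map_cons, List.reverse_cons]
        simp

def wordsOf (l : List Char) : List (List Char) :=
  (List.splitOnP (fun c => PySem.Chars.isspace c) l).filter (fun w => !w.isEmpty)

theorem modifyHead_fun_id (l : List (List Char)) : l.modifyHead (fun x => x) = l := by
  cases l <;> rfl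

theorem chars_split₀_go (l : List Char) : ∀ (cur : List Char) (acc : List (List Char)),
    PySem.Chars.split₀.go l cur acc =
      acc.reverse ++ ((List.splitOnP (fun c => PySem.Chars.isspace c) l).modifyHead
        (cur.reverse ++ ·)).filter (fun w => !w.isEmpty) := by
  induction l with
  | nil =>
    intro cur acc
    rcases hc : cur with _ | ⟨x, xs⟩ <;>
      simp [PySem.Chars.split₀.go, List.splitOnP_nil, hc]
  | cons c rest ih =>
    intro cur acc
    rw [PySem.Chars.split₀.go]
    by_cases hsp : PySem.Chars.isspace c
    · rcases hc : cur with _ | ⟨x, xs⟩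
      · simp [hsp, ih, List.splitOnP_cons, modifyHead_fun_id]
      · simp [hsp, ih, List.splitOnP_cons, hc, modifyHead_fun_id]
    · rcases hS : List.splitOnP (fun c => PySem.Chars.isspace c) rest with _ | ⟨w, ws⟩
      · exact absurd hS (List.splitOnP_ne_nil _ rest)
      · simp [hsp, ih, List.splitOnP_cons, hS]

theorem chars_split₀_eq (l : List Char) : PySem.Chars.split₀ l = wordsOf l := by
  have h := chars_split₀_go l [] []
  rcases hS : List.splitOnP (fun c => PySem.Chars.isspace c) l with _ | ⟨w, ws⟩
  · exact absurd hS (List.splitOnP_ne_nil _ l)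
  · simpa [PySem.Chars.split₀, hS, wordsOf] using h

theorem wordsOf_reverse (l : List Char) : wordsOf l.reverse = qRev (wordsOf l) := by
  unfold wordsOf
  rw [splitOnP_reverse]
  unfold qRev
  rw [List.filter_reverse, List.filter_map]
  have hcomp : ((fun w : List Char => !w.isEmpty) ∘ List.reverse) = fun w : List Char => !w.isEmpty := by
    funext w; simp
  rw [hcomp]

theorem sum_qRev (g : List Char → Int) (ws : List (List Char)) :
    ((qRev ws).map g).sum = (ws.map (fun w => g w.reverse)).sum := by
  unfold qRev
  rw [List.map_reverse, List.sum_reverse, List.map_map]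
  rfl

-- ---- folds of the two ports as sums ----

theorem foldA_sum (words : List String) : ∀ (s2 check : Int),
    (words.foldl (fun (st : Int × Int) (word : String) =>
      let sum2 := st.1
      let check := st.2
      let sum1 : Int := 0
      let sum2 := if check = 0 then sum2 + sum1 else sum2
      let sum1 := hexA_go word.toList sum1 1
      (sum2 + sum1, (1 : Int))) (s2, check)).1
    = s2 + (words.map (fun w => hexA_go w.toList 0 1)).sum := by
  induction words with
  | nil => intro s2 check; simp
  | cons w ws ih =>
    intro s2 check
    rw [List.foldl_cons, ih]
    by_cases h : check = 0 <;> simp [h] <;> ring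

theorem foldB_sum (words : List String) : ∀ (t : Int),
    words.foldl (fun total word => total + hexB_word word.toList 0) t
    = t + (words.map (fun w => hexB_word w.toList 0)).sum := by
  induction words with
  | nil => intro t; simp
  | cons w ws ih =>
    intro t
    rw [List.foldl_cons, ih]
    simp [List.map_cons, List.sum_cons]
    ring

theorem map_toList_split₀ (s : String) (g : List Char → Int) :
    (PySem.Str.split₀ s).map (fun w => g w.toList)
      = (PySem.Chars.split₀ s.toList).map g := by
  rw [← PySem.Str.split₀_map_toList, List.map_map]
  rfl

-- ===== VERDICT (by name: the statement is the Claim_ definition above) =====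
theorem hex_word_sum_spec : Claim_equal_hex_word_sum := by
  intro s _
  unfold Spec_hex_word_sum hex_word_sum hex_word_sum_alt
  rw [PySem.Str.slice?_none_none_neg_one]
  simp only [Option.getD_some]
  rw [foldA_sum, foldB_sum, zero_add, zero_add]
  have hA := map_toList_split₀ (String.ofList s.toList.reverse) (fun cs => hexA_go cs 0 1)
  have hB := map_toList_split₀ s (fun cs => hexB_word cs 0)
  rw [hA, hB]
  have htl : (String.ofList s.toList.reverse).toList = s.toList.reverse := by simp
  rw [htl, chars_split₀_eq, chars_split₀_eq, wordsOf_reverse, sum_qRev]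
  congr 1
  apply List.map_congr_left
  intro w _
  exact word_eq w
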